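-- pv_equiv track=rewrite | github.com/SanjithChockan/CSP-Solver-AI | main.py | least_constring_val
-- ===== SOURCE A (Python) =====
-- from collections import OrderedDict
--
-- def least_constring_val(var_and_domain, unassigned_variables, current_constraints):
--     count_dict = {}
--
--     var, domain = var_and_domain
--     for d in domain:
--         count_dict[d] = 0
--         for unassigned_var in unassigned_variables:
--             for const in current_constraints:
--                 if var in const and  unassigned_var in const:
--
--                     for b in unassigned_variables[unassigned_var]:
--                         const_list = const.split(" ")
--                         var_and_value = {}
--
--                         if var == const_list[0]:
--                             var_and_value[ "first_var"] = d
--                             var_and_value[ "second_var"] = b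
--                         else:
--                             var_and_value[ "first_var"] = b
--                             var_and_value[ "second_var"] = d
--
--                         if const_list[1] == '!':
--                             if var_and_value[ "first_var"] != var_and_value[ "second_var"]:
--                                 count_dict[d] += 1
--                         elif const_list[1] == '>':
--                             if var_and_value[ "first_var"] > var_and_value[ "second_var"]:
--                                 count_dict[d] += 1
--                         elif const_list[1] == '<':
--                             if var_and_value[ "first_var"] < var_and_value[ "second_var"]:
--                                 count_dict[d] += 1
--                         elif const_list[1] == '=':
--                             if var_and_value[ "first_var"] == var_and_value[ "second_var"]:
--                                 count_dict[d] += 1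
--
--     sorted_count_dict = OrderedDict(sorted(count_dict.items(), key=lambda x:x[1], reverse=True))
--     return sorted_count_dict.keys()
-- ===== SOURCE B (Python) =====
-- def _count_below(a, x, inclusive):
--     # number of elements of the sorted list a that are < x (<= x when inclusive), by binary search
--     lo, hi = 0, len(a)
--     while lo < hi:
--         mid = (lo + hi) // 2
--         v = a[mid]
--         if v < x or (inclusive and v == x):
--             lo = mid + 1
--         else:
--             hi = mid
--     return lo
--
-- def least_constring_val(var_and_domain, unassigned_variables, current_constraints):
--     var, domain = var_and_domain
--     # preprocess once: one (op, var_is_first, sorted b-domain) spec per relevant (variable, constraint) pair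
--     specs = []
--     for unassigned_var in unassigned_variables:
--         sb = sorted(unassigned_variables[unassigned_var])
--         for const in current_constraints:
--             if var in const and unassigned_var in const:
--                 toks = const.split(" ")
--                 if len(toks) >= 2:
--                     specs.append((toks[1], var == toks[0], sb))
--     counts = {}
--     for d in domain:
--         total = 0
--         for op, var_first, sb in specs:
--             n = len(sb)
--             lo = _count_below(sb, d, False)   # |{b : b < d}|
--             hi = _count_below(sb, d, True)    # |{b : b <= d}|
--             if op == '!':
--                 total += n - (hi - lo)
--             elif op == '>':
--                 total += lo if var_first else n - hi
--             elif op == '<':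
--                 total += n - hi if var_first else lo
--             elif op == '=':
--                 total += hi - lo
--         counts[d] = total
--     return [d for d, _ in sorted(counts.items(), key=lambda x: x[1], reverse=True)]
-- ===== Notes on version B (the rewrite author's own statement) =====
-- stated objective: faster
-- what changed: B precomputes, once, one (operator, which-side, sorted b-domain) spec per relevant (unassigned variable, constraint) pair instead of re-scanning all variables/constraints and re-splitting each constraint string per domain value, and counts the satisfying b-values of each spec in closed form via binary search on the sorted b-domain instead of looping over it.
import Mathlib
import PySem

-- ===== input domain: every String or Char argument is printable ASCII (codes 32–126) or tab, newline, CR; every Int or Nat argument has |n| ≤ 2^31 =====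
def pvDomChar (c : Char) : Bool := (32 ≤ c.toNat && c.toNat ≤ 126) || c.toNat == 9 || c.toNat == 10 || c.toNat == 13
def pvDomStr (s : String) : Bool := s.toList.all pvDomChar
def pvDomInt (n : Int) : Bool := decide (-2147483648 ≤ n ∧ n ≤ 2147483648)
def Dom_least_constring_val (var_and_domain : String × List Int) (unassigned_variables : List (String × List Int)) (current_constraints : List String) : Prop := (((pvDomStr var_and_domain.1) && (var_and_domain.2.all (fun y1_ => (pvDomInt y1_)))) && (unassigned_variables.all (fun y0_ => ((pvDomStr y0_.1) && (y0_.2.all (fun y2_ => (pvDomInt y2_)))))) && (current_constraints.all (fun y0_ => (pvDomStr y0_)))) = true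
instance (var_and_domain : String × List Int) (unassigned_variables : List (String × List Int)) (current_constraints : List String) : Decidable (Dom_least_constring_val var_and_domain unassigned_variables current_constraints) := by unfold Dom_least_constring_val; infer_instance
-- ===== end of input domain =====

-- B replaces A's rescan of every (unassigned variable, constraint, b-value) triple per domain value by a
-- precomputed list of (operator, side, sorted b-domain) specs and counts satisfying b-values by binary search.
-- Equivalence is about the RETURN value (A returns a dict keys view; both are compared as the list of keys).

-- dict[str, list[int]] is an association list (insertion order); iteration = keys in first-occurrence
-- order, lookup = first match (the task's dict convention; on a real Python dict keys are unique).
def pvKeys (uvl : List (String × List Int)) : List String :=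
  PySem.Set.ofList (uvl.map Prod.fst)

def pvLookup (uvl : List (String × List Int)) (k : String) : List Int :=
  ((uvl.find? (fun p => p.1 == k)).map Prod.snd).getD []

-- ===== PORT A =====
def least_constring_val (var_and_domain : String × List Int) (unassigned_variables : List (String × List Int)) (current_constraints : List String) : List Int :=
  let var := var_and_domain.1
  let domain := var_and_domain.2
  let count_dict : PySem.Dict Int Int :=
    domain.foldl (fun cd0 d =>
      (pvKeys unassigned_variables).foldl (fun cd1 unassigned_var =>
        current_constraints.foldl (fun cd2 const =>
          if PySem.Str.isIn var const && PySem.Str.isIn unassigned_var const then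
            (pvLookup unassigned_variables unassigned_var).foldl (fun cd3 b =>
              let const_list := (PySem.Str.split? const " ").getD []   -- sep ≠ "", always `some`
              -- var_and_value: (first_var, second_var); const_list.getD 0 "" = const_list[0] (split is never empty)
              let var_and_value : Int × Int :=
                if var == const_list.getD 0 "" then (d, b) else (b, d)
              -- const_list[1]: Python raises IndexError when absent; those inputs are outside Pre_
              match PySem.List.pyGet? const_list (1 : Int) with
              | none => cd3
              | some c1 =>
                if c1 == "!" then
                  (if var_and_value.1 != var_and_value.2 then cd3.insert d (cd3.getD d 0 + 1) else cd3)
                else if c1 == ">" then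
                  (if var_and_value.1 > var_and_value.2 then cd3.insert d (cd3.getD d 0 + 1) else cd3)
                else if c1 == "<" then
                  (if var_and_value.1 < var_and_value.2 then cd3.insert d (cd3.getD d 0 + 1) else cd3)
                else if c1 == "=" then
                  (if var_and_value.1 == var_and_value.2 then cd3.insert d (cd3.getD d 0 + 1) else cd3)
                else cd3) cd2
          else cd2) cd1) (cd0.insert d 0)) PySem.Dict.empty
  (PySem.List.sorted count_dict.items (fun x => x.2) true).map Prod.fst

-- ===== PORT B =====
-- hand-written binary search (Source B may not import bisect since A does not); a.getD mid 0 = a[mid],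
-- exact because every call keeps lo ≤ mid < hi ≤ a.length
def pvCountBelowLoop (a : List Int) (x : Int) (inclusive : Bool) (lo hi : Nat) : Nat :=
  if lo < hi then
    let mid := (lo + hi) / 2
    let v := a.getD mid 0
    if v < x || (inclusive && v == x) then pvCountBelowLoop a x inclusive (mid + 1) hi
    else pvCountBelowLoop a x inclusive lo mid
  else lo
termination_by hi - lo
decreasing_by all_goals omega

def pvCountBelow (a : List Int) (x : Int) (inclusive : Bool) : Nat :=
  pvCountBelowLoop a x inclusive 0 a.length

def least_constring_val_alt (var_and_domain : String × List Int) (unassigned_variables : List (String × List Int)) (current_constraints : List String) : List Int :=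
  let var := var_and_domain.1
  let domain := var_and_domain.2
  let specs : List (String × Bool × List Int) :=
    (pvKeys unassigned_variables).foldl (fun acc unassigned_var =>
      let sb := PySem.List.sorted (pvLookup unassigned_variables unassigned_var) (fun b => b) false
      current_constraints.foldl (fun acc const =>
        if PySem.Str.isIn var const && PySem.Str.isIn unassigned_var const then
          let toks := (PySem.Str.split? const " ").getD []
          if 2 ≤ toks.length then acc ++ [(toks.getD 1 "", var == toks.getD 0 "", sb)] else acc
        else acc) acc) []
  let counts : PySem.Dict Int Int :=
    domain.foldl (fun cd d =>
      cd.insert d (specs.foldl (fun total spec =>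
        let op := spec.1
        let var_first := spec.2.1
        let sb := spec.2.2
        let n : Int := sb.length
        let lo : Int := pvCountBelow sb d false
        let hi : Int := pvCountBelow sb d true
        if op == "!" then total + (n - (hi - lo))
        else if op == ">" then total + (if var_first then lo else n - hi)
        else if op == "<" then total + (if var_first then n - hi else lo)
        else if op == "=" then total + (hi - lo)
        else total) 0)) PySem.Dict.empty
  (PySem.List.sorted counts.items (fun x => x.2) true).map Prod.fst

-- ===== PRECONDITION & SPEC =====
-- Pre_ excludes exactly the inputs on which the Python A raises IndexError: a constraint string with
-- fewer than two space-separated tokens that is actually reached (nonempty domain, var inside it, and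
-- some unassigned variable inside it whose domain is nonempty).
def Pre_least_constring_val (var_and_domain : String × List Int) (unassigned_variables : List (String × List Int)) (current_constraints : List String) : Prop :=
  var_and_domain.2 = [] ∨
  ∀ const ∈ current_constraints,
    2 ≤ ((PySem.Str.split? const " ").getD []).length ∨
    PySem.Str.isIn var_and_domain.1 const = false ∨
    ∀ u ∈ pvKeys unassigned_variables,
      PySem.Str.isIn u const = false ∨ pvLookup unassigned_variables u = []
instance (var_and_domain : String × List Int) (unassigned_variables : List (String × List Int)) (current_constraints : List String) : Decidable (Pre_least_constring_val var_and_domain unassigned_variables current_constraints) := by unfold Pre_least_constring_val; infer_instance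

def pvWitness_least_constring_val : (String × List Int) × (List (String × List Int)) × List String :=
  (("x", [1, 2]), [("y", [1, 3])], ["x < y"])

def Spec_least_constring_val (var_and_domain : String × List Int) (unassigned_variables : List (String × List Int)) (current_constraints : List String) (out : List Int) : Prop := out = least_constring_val_alt var_and_domain unassigned_variables current_constraints
instance (var_and_domain : String × List Int) (unassigned_variables : List (String × List Int)) (current_constraints : List String) (out : List Int) : Decidable (Spec_least_constring_val var_and_domain unassigned_variables current_constraints out) := by unfold Spec_least_constring_val; infer_instance

-- ===== CLAIM (what is proved, stated in full; the proofs are below) =====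
def Claim_equal_least_constring_val : Prop := ∀ (var_and_domain : String × List Int) (unassigned_variables : List (String × List Int)) (current_constraints : List String), Dom_least_constring_val var_and_domain unassigned_variables current_constraints → Pre_least_constring_val var_and_domain unassigned_variables current_constraints → Spec_least_constring_val var_and_domain unassigned_variables current_constraints (least_constring_val var_and_domain unassigned_variables current_constraints)

-- ===== LEMMAS AND PROOFS =====

lemma countP_getElem_iff (p : Int → Bool) (hmono : ∀ u v : Int, u ≤ v → p v = true → p u = true)
    (a : List Int) (hs : a.Pairwise (fun x y : Int => x ≤ y)) (i : Nat) (hi : i < a.length) :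
    (p a[i] = true ↔ i < a.countP p) := by
  induction a generalizing i with
  | nil => simp at hi
  | cons h t ih =>
    rw [List.pairwise_cons] at hs
    cases i with
    | zero =>
      simp only [List.getElem_cons_zero, List.countP_cons]
      constructor
      · intro hp; simp [hp]
      · intro hlt
        by_cases hph : p h = true
        · exact hph
        · simp [hph] at hlt
          obtain ⟨y, hy, hpy⟩ := hlt
          exact absurd (hmono h y (hs.1 y hy) hpy) hph
    | succ j =>
      simp only [List.getElem_cons_succ, List.countP_cons]
      have hj : j < t.length := by simpa using hi
      rw [ih hs.2 j hj]
      by_cases hph : p h = true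
      · simp [hph]
      · have h0 : t.countP p = 0 := by
          rw [List.countP_eq_zero]
          intro y hy hpy
          exact absurd (hmono h y (hs.1 y hy) hpy) hph
        simp [hph, h0]


lemma pvmono (x : Int) (inc : Bool) : ∀ u v : Int, u ≤ v →
    (decide (v < x) || (inc && v == x)) = true → (decide (u < x) || (inc && u == x)) = true := by
  intro u v huv h
  cases inc <;> simp_all <;> omega

lemma pvCountBelowLoop_eq (a : List Int) (x : Int) (inc : Bool)
    (hs : a.Pairwise (fun u v : Int => u ≤ v)) (lo hi : Nat)
    (h1 : lo ≤ a.countP (fun v => v < x || (inc && v == x)))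
    (h2 : a.countP (fun v => v < x || (inc && v == x)) ≤ hi) (h3 : hi ≤ a.length) :
    pvCountBelowLoop a x inc lo hi = a.countP (fun v => v < x || (inc && v == x)) := by
  fun_induction pvCountBelowLoop a x inc lo hi with
  | case1 lo hi hlt mid v hv ih =>
    have hmid : mid < a.length := by omega
    have hget : v = a[mid] := by simp [v, List.getElem?_eq_getElem hmid]
    apply ih
    · have := (countP_getElem_iff (fun v => v < x || (inc && v == x)) (pvmono x inc) a hs mid hmid).mp
        (by rw [← hget]; exact hv)
      omega
    · exact h2
    · exact h3
  | case2 lo hi hlt mid v hv ih =>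
    have hmid : mid < a.length := by omega
    have hget : v = a[mid] := by simp [v, List.getElem?_eq_getElem hmid]
    apply ih
    · exact h1
    · have := (countP_getElem_iff (fun v => v < x || (inc && v == x)) (pvmono x inc) a hs mid hmid)
      rw [← hget] at this
      have : ¬ (mid < a.countP (fun v => v < x || (inc && v == x))) := by
        rw [← this]; simpa using hv
      omega
    · omega
  | case3 lo hi h => omega


lemma pvCountBelow_lt (a : List Int) (x : Int) (hs : a.Pairwise (fun u v : Int => u ≤ v)) :
    pvCountBelow a x false = a.countP (fun v => decide (v < x)) := by
  have hc : a.countP (fun v => v < x || (false && v == x)) = a.countP (fun v => decide (v < x)) := by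
    apply List.countP_congr; intro v _; simp
  rw [pvCountBelow, pvCountBelowLoop_eq a x false hs 0 a.length (by omega)
    (by rw [hc]; exact List.countP_le_length) le_rfl, hc]

lemma pvCountBelow_le (a : List Int) (x : Int) (hs : a.Pairwise (fun u v : Int => u ≤ v)) :
    pvCountBelow a x true = a.countP (fun v => decide (v ≤ x)) := by
  have hc : a.countP (fun v => v < x || (true && v == x)) = a.countP (fun v => decide (v ≤ x)) := by
    apply List.countP_congr; intro v _
    simp only [Bool.true_and, Bool.or_eq_true, decide_eq_true_eq, beq_iff_eq]
    constructor
    · intro h; rcases h with h | h <;> omega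
    · intro h; omega
  rw [pvCountBelow, pvCountBelowLoop_eq a x true hs 0 a.length (by omega)
    (by rw [hc]; exact List.countP_le_length) le_rfl, hc]

lemma foldl_inc_count (d : Int) (c : Int → Bool) (bv : List Int) (cd0 : PySem.Dict Int Int) (v : Int) :
    bv.foldl (fun cd b => if c b then cd.insert d (cd.getD d 0 + 1) else cd) (cd0.insert d v)
      = cd0.insert d (v + (bv.countP c : Int)) := by
  induction bv generalizing v with
  | nil => simp
  | cons b t ih =>
    simp only [List.foldl_cons, List.countP_cons]
    by_cases hb : c b = true
    · rw [if_pos hb, PySem.Dict.getD_insert_self, PySem.Dict.insert_insert_self, ih (v + 1)]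
      congr 1
      simp [hb]
      ring
    · rw [if_neg hb, ih v]
      simp [hb]

def condOf (var const : String) (d : Int) (b : Int) : Bool :=
  let const_list := (PySem.Str.split? const " ").getD []
  let vv : Int × Int := if var == const_list.getD 0 "" then (d, b) else (b, d)
  match PySem.List.pyGet? const_list (1 : Int) with
  | none => false
  | some c1 =>
    if c1 == "!" then vv.1 != vv.2
    else if c1 == ">" then decide (vv.1 > vv.2)
    else if c1 == "<" then decide (vv.1 < vv.2)
    else if c1 == "=" then vv.1 == vv.2
    else false

lemma A_bloop_eq (var const : String) (d : Int) (bv : List Int) (cd0 : PySem.Dict Int Int) (v : Int) :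
    bv.foldl (fun cd3 b =>
      let const_list := (PySem.Str.split? const " ").getD []
      let var_and_value : Int × Int :=
        if var == const_list.getD 0 "" then (d, b) else (b, d)
      match PySem.List.pyGet? const_list (1 : Int) with
      | none => cd3
      | some c1 =>
        if c1 == "!" then
          (if var_and_value.1 != var_and_value.2 then cd3.insert d (cd3.getD d 0 + 1) else cd3)
        else if c1 == ">" then
          (if var_and_value.1 > var_and_value.2 then cd3.insert d (cd3.getD d 0 + 1) else cd3)
        else if c1 == "<" then
          (if var_and_value.1 < var_and_value.2 then cd3.insert d (cd3.getD d 0 + 1) else cd3)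
        else if c1 == "=" then
          (if var_and_value.1 == var_and_value.2 then cd3.insert d (cd3.getD d 0 + 1) else cd3)
        else cd3) (cd0.insert d v)
      = cd0.insert d (v + (bv.countP (condOf var const d) : Int)) := by
  rw [PySem.List.foldl_congr_mem bv _
    (fun cd3 b => if condOf var const d b then cd3.insert d (cd3.getD d 0 + 1) else cd3) _ ?_]
  · exact foldl_inc_count d (condOf var const d) bv cd0 v
  · intro cd3 b _
    unfold condOf
    cases hget : PySem.List.pyGet? ((PySem.Str.split? const " ").getD []) (1 : Int) with
    | none => simp [hget]
    | some c1 =>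
      simp only [hget]
      split_ifs <;> simp_all <;> omega


def pairCount (uvl : List (String × List Int)) (var u const : String) (d : Int) : Int :=
  if PySem.Str.isIn var const && PySem.Str.isIn u const then
    ((pvLookup uvl u).countP (condOf var const d) : Int)
  else 0

lemma A_ccloop_eq (var u : String) (uvl : List (String × List Int)) (cc : List String)
    (d : Int) (cd0 : PySem.Dict Int Int) (v : Int) :
    cc.foldl (fun cd2 const =>
        if PySem.Str.isIn var const && PySem.Str.isIn u const then
          (pvLookup uvl u).foldl (fun cd3 b =>
            let const_list := (PySem.Str.split? const " ").getD []
            let var_and_value : Int × Int :=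
              if var == const_list.getD 0 "" then (d, b) else (b, d)
            match PySem.List.pyGet? const_list (1 : Int) with
            | none => cd3
            | some c1 =>
              if c1 == "!" then
                (if var_and_value.1 != var_and_value.2 then cd3.insert d (cd3.getD d 0 + 1) else cd3)
              else if c1 == ">" then
                (if var_and_value.1 > var_and_value.2 then cd3.insert d (cd3.getD d 0 + 1) else cd3)
              else if c1 == "<" then
                (if var_and_value.1 < var_and_value.2 then cd3.insert d (cd3.getD d 0 + 1) else cd3)
              else if c1 == "=" then
                (if var_and_value.1 == var_and_value.2 then cd3.insert d (cd3.getD d 0 + 1) else cd3)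
              else cd3) cd2
        else cd2) (cd0.insert d v)
      = cd0.insert d (v + (cc.map (fun const => pairCount uvl var u const d)).sum) := by
  induction cc generalizing v with
  | nil => simp
  | cons const t ih =>
    simp only [List.foldl_cons, List.map_cons, List.sum_cons]
    by_cases hm : (PySem.Str.isIn var const && PySem.Str.isIn u const) = true
    · rw [if_pos hm, A_bloop_eq var const d (pvLookup uvl u) cd0 v, ih]
      rw [pairCount, if_pos hm]
      ring_nf
    · rw [if_neg hm, ih]
      rw [pairCount, if_neg hm]
      ring_nf

lemma A_keyloop_eq (var : String) (uvl : List (String × List Int)) (cc : List String)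
    (ks : List String) (d : Int) (cd0 : PySem.Dict Int Int) (v : Int) :
    ks.foldl (fun cd1 unassigned_var =>
      cc.foldl (fun cd2 const =>
        if PySem.Str.isIn var const && PySem.Str.isIn unassigned_var const then
          (pvLookup uvl unassigned_var).foldl (fun cd3 b =>
            let const_list := (PySem.Str.split? const " ").getD []
            let var_and_value : Int × Int :=
              if var == const_list.getD 0 "" then (d, b) else (b, d)
            match PySem.List.pyGet? const_list (1 : Int) with
            | none => cd3
            | some c1 =>
              if c1 == "!" then
                (if var_and_value.1 != var_and_value.2 then cd3.insert d (cd3.getD d 0 + 1) else cd3)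
              else if c1 == ">" then
                (if var_and_value.1 > var_and_value.2 then cd3.insert d (cd3.getD d 0 + 1) else cd3)
              else if c1 == "<" then
                (if var_and_value.1 < var_and_value.2 then cd3.insert d (cd3.getD d 0 + 1) else cd3)
              else if c1 == "=" then
                (if var_and_value.1 == var_and_value.2 then cd3.insert d (cd3.getD d 0 + 1) else cd3)
              else cd3) cd2
        else cd2) cd1) (cd0.insert d v)
      = cd0.insert d (v + (ks.map (fun u => (cc.map (fun const => pairCount uvl var u const d)).sum)).sum) := by
  induction ks generalizing v with
  | nil => simp
  | cons u t ih =>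
    simp only [List.foldl_cons, List.map_cons, List.sum_cons]
    rw [A_ccloop_eq var u uvl cc d cd0 v, ih]
    ring_nf

def gspec (uvl : List (String × List Int)) (var u const : String) : List (String × Bool × List Int) :=
  if PySem.Str.isIn var const && PySem.Str.isIn u const then
    let toks := (PySem.Str.split? const " ").getD []
    if 2 ≤ toks.length then
      [(toks.getD 1 "", var == toks.getD 0 "", PySem.List.sorted (pvLookup uvl u) (fun b => b) false)]
    else []
  else []

lemma B_ccspecs_eq (var u : String) (uvl : List (String × List Int)) (cc : List String)
    (acc : List (String × Bool × List Int)) :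
    cc.foldl (fun acc const =>
        if PySem.Str.isIn var const && PySem.Str.isIn u const then
          let toks := (PySem.Str.split? const " ").getD []
          if 2 ≤ toks.length then
            acc ++ [(toks.getD 1 "", var == toks.getD 0 "", PySem.List.sorted (pvLookup uvl u) (fun b => b) false)]
          else acc
        else acc) acc
      = acc ++ cc.flatMap (fun const => gspec uvl var u const) := by
  rw [PySem.List.foldl_congr_mem cc _ (fun acc const => acc ++ gspec uvl var u const) _ ?_]
  · exact PySem.List.foldl_append_eq_flatMap _ cc acc
  · intro a const _
    unfold gspec
    beta_reduce
    by_cases h1 : (PySem.Str.isIn var const && PySem.Str.isIn u const) = true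
    · rw [if_pos h1, if_pos h1]
      by_cases h2 : 2 ≤ ((PySem.Str.split? const " ").getD []).length
      · rw [if_pos h2]
        exact (if_pos h2 (c := _) ).symm ▸ rfl
      · rw [if_neg h2, if_neg h2]
        simp
    · rw [if_neg h1, if_neg h1]
      simp

lemma B_specs_eq (var : String) (uvl : List (String × List Int)) (cc : List String)
    (ks : List String) :
    ks.foldl (fun acc unassigned_var =>
      let sb := PySem.List.sorted (pvLookup uvl unassigned_var) (fun b => b) false
      cc.foldl (fun acc const =>
        if PySem.Str.isIn var const && PySem.Str.isIn unassigned_var const then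
          let toks := (PySem.Str.split? const " ").getD []
          if 2 ≤ toks.length then acc ++ [(toks.getD 1 "", var == toks.getD 0 "", sb)] else acc
        else acc) acc) ([] : List (String × Bool × List Int))
      = ks.flatMap (fun u => cc.flatMap (fun const => gspec uvl var u const)) := by
  rw [PySem.List.foldl_congr_mem ks _ (fun acc u => acc ++ cc.flatMap (fun const => gspec uvl var u const)) _ ?_]
  · rw [PySem.List.foldl_append_eq_flatMap]
    simp
  · intro a u _
    exact B_ccspecs_eq var u uvl cc a

lemma pyGet1_of_len (l : List String) (h : 2 ≤ l.length) :
    PySem.List.pyGet? l (1:Int) = some (l[1]?.getD "") := by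
  have h1 : (1:Int) < (l.length:Int) := by exact_mod_cast h
  simp [PySem.List.pyGet?, PySem.List.pyIdx?, h1,
    List.getElem?_eq_getElem (show 1 < l.length by omega)]

lemma pyGet1_of_short (l : List String) (h : l.length < 2) :
    PySem.List.pyGet? l (1:Int) = none := by
  simp [PySem.List.pyGet?, PySem.List.pyIdx?]
  omega

lemma cnt_le_split (l : List Int) (d : Int) :
    l.countP (fun v => decide (v ≤ d)) = l.countP (fun v => decide (v < d)) + l.countP (fun v => v == d) := by
  induction l with
  | nil => simp
  | cons a t ih =>
    simp only [List.countP_cons, ih]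
    rcases lt_trichotomy a d with h | h | h
    · simp [h, le_of_lt h, ne_of_lt h]; omega
    · simp [h]; omega
    · simp [not_le.mpr h, not_lt.mpr (le_of_lt h), ne_of_gt h]

lemma cnt_ne (l : List Int) (d : Int) :
    l.countP (fun b => b != d) + l.countP (fun b => b == d) = l.length := by
  induction l with
  | nil => simp
  | cons a t ih =>
    simp only [List.countP_cons, List.length_cons]
    by_cases h2 : a = d <;> simp [h2] <;> omega

lemma cnt_gt (l : List Int) (d : Int) :
    l.countP (fun b => decide (d < b)) + l.countP (fun b => decide (b ≤ d)) = l.length := by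
  induction l with
  | nil => simp
  | cons a t ih =>
    simp only [List.countP_cons, List.length_cons]
    by_cases h2 : d < a
    · simp [h2, not_le.mpr h2]
      omega
    · simp [h2, not_lt.mp h2]
      omega

def contribB (d : Int) (spec : String × Bool × List Int) : Int :=
  let n : Int := spec.2.2.length
  let lo : Int := pvCountBelow spec.2.2 d false
  let hi : Int := pvCountBelow spec.2.2 d true
  if spec.1 == "!" then n - (hi - lo)
  else if spec.1 == ">" then (if spec.2.1 then lo else n - hi)
  else if spec.1 == "<" then (if spec.2.1 then n - hi else lo)
  else if spec.1 == "=" then hi - lo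
  else 0

lemma condOf_bang (var const : String) (d : Int) (c1 : String)
    (hget : PySem.List.pyGet? ((PySem.Str.split? const " ").getD []) (1:Int) = some c1)
    (h : c1 = "!") : condOf var const d = fun b => b != d := by
  funext b
  simp only [condOf, hget, h]
  by_cases hvf : var = ((PySem.Str.split? const " ").getD [])[0]?.getD "" <;>
    by_cases hbd : b = d <;> (simp [hvf, hbd]; try exact bne_comm)

lemma condOf_gtop (var const : String) (d : Int) (c1 : String)
    (hget : PySem.List.pyGet? ((PySem.Str.split? const " ").getD []) (1:Int) = some c1)
    (h : c1 = ">") (hvf : var = ((PySem.Str.split? const " ").getD [])[0]?.getD "") :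
    condOf var const d = fun b => decide (b < d) := by
  funext b
  simp [condOf, hget, h, hvf]

lemma condOf_gtop' (var const : String) (d : Int) (c1 : String)
    (hget : PySem.List.pyGet? ((PySem.Str.split? const " ").getD []) (1:Int) = some c1)
    (h : c1 = ">") (hvf : ¬ var = ((PySem.Str.split? const " ").getD [])[0]?.getD "") :
    condOf var const d = fun b => decide (d < b) := by
  funext b
  simp [condOf, hget, h, hvf]

lemma condOf_ltop (var const : String) (d : Int) (c1 : String)
    (hget : PySem.List.pyGet? ((PySem.Str.split? const " ").getD []) (1:Int) = some c1)
    (h : c1 = "<") (hvf : var = ((PySem.Str.split? const " ").getD [])[0]?.getD "") :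
    condOf var const d = fun b => decide (d < b) := by
  funext b
  simp [condOf, hget, h, hvf]

lemma condOf_ltop' (var const : String) (d : Int) (c1 : String)
    (hget : PySem.List.pyGet? ((PySem.Str.split? const " ").getD []) (1:Int) = some c1)
    (h : c1 = "<") (hvf : ¬ var = ((PySem.Str.split? const " ").getD [])[0]?.getD "") :
    condOf var const d = fun b => decide (b < d) := by
  funext b
  simp [condOf, hget, h, hvf]

lemma condOf_eqop (var const : String) (d : Int) (c1 : String)
    (hget : PySem.List.pyGet? ((PySem.Str.split? const " ").getD []) (1:Int) = some c1)
    (h : c1 = "=") : condOf var const d = fun b => b == d := by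
  funext b
  simp only [condOf, hget, h]
  by_cases hvf : var = ((PySem.Str.split? const " ").getD [])[0]?.getD "" <;>
    by_cases hbd : b = d <;> (simp [hvf, hbd]; try simp [Ne.symm hbd])

lemma condOf_other (var const : String) (d : Int) (c1 : String)
    (hget : PySem.List.pyGet? ((PySem.Str.split? const " ").getD []) (1:Int) = some c1)
    (h1 : ¬ c1 = "!") (h2 : ¬ c1 = ">") (h3 : ¬ c1 = "<") (h4 : ¬ c1 = "=") :
    condOf var const d = fun _ => false := by
  funext b
  simp [condOf, hget, h1, h2, h3, h4]

lemma gspec_contrib_eq (uvl : List (String × List Int)) (var u const : String) (d : Int) :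
    ((gspec uvl var u const).map (contribB d)).sum = pairCount uvl var u const d := by
  by_cases hm : (PySem.Str.isIn var const && PySem.Str.isIn u const) = true
  · unfold gspec pairCount
    rw [if_pos hm, if_pos hm]
    by_cases hlen : 2 ≤ ((PySem.Str.split? const " ").getD []).length
    · rw [if_pos hlen]
      have hget := pyGet1_of_len ((PySem.Str.split? const " ").getD []) hlen
      have hpw := PySem.List.sorted_pairwise (pvLookup uvl u) (fun b : Int => b)
      have hperm := PySem.List.sorted_perm (pvLookup uvl u) (fun b : Int => b) false
      have hlo := pvCountBelow_lt (PySem.List.sorted (pvLookup uvl u) (fun b : Int => b) false) d hpw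
      have hhi := pvCountBelow_le (PySem.List.sorted (pvLookup uvl u) (fun b : Int => b) false) d hpw
      have hclt := hperm.countP_eq (fun v => decide (v < d))
      have hcle := hperm.countP_eq (fun v => decide (v ≤ d))
      have hceq := hperm.countP_eq (fun b => b == d)
      have hcne := hperm.countP_eq (fun b => b != d)
      have hcgt := hperm.countP_eq (fun b => decide (d < b))
      have hlensb := hperm.length_eq
      have hsplit := cnt_le_split (PySem.List.sorted (pvLookup uvl u) (fun b : Int => b) false) d
      have hne := cnt_ne (PySem.List.sorted (pvLookup uvl u) (fun b : Int => b) false) d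
      have hgt := cnt_gt (PySem.List.sorted (pvLookup uvl u) (fun b : Int => b) false) d
      simp only [List.map_cons, List.map_nil, List.sum_cons, List.sum_nil, add_zero,
        List.getD_eq_getElem?_getD]
      by_cases hop1 : ((PySem.Str.split? const " ").getD [])[1]?.getD "" = "!"
      · rw [condOf_bang var const d _ hget hop1, hop1]
        simp [contribB]
        omega
      · by_cases hop2 : ((PySem.Str.split? const " ").getD [])[1]?.getD "" = ">"
        · by_cases hvf : var = ((PySem.Str.split? const " ").getD [])[0]?.getD ""
          · rw [condOf_gtop var const d _ hget hop2 hvf, hop2]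
            simp [contribB, hvf]
            omega
          · rw [condOf_gtop' var const d _ hget hop2 hvf, hop2]
            simp [contribB, hvf]
            omega
        · by_cases hop3 : ((PySem.Str.split? const " ").getD [])[1]?.getD "" = "<"
          · by_cases hvf : var = ((PySem.Str.split? const " ").getD [])[0]?.getD ""
            · rw [condOf_ltop var const d _ hget hop3 hvf, hop3]
              simp [contribB, hvf]
              omega
            · rw [condOf_ltop' var const d _ hget hop3 hvf, hop3]
              simp [contribB, hvf]
              omega
          · by_cases hop4 : ((PySem.Str.split? const " ").getD [])[1]?.getD "" = "="
            · rw [condOf_eqop var const d _ hget hop4, hop4]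
              simp [contribB]
              omega
            · rw [condOf_other var const d _ hget hop1 hop2 hop3 hop4]
              simp [contribB, hop1, hop2, hop3, hop4]
    · rw [if_neg hlen]
      have hnone := pyGet1_of_short ((PySem.Str.split? const " ").getD []) (by omega)
      simp only [List.map_nil, List.sum_nil]
      have h0 : (pvLookup uvl u).countP (condOf var const d) = 0 := by
        rw [List.countP_eq_zero]
        intro b _
        simp [condOf, hnone]
      rw [h0]
      simp
  · unfold gspec pairCount
    rw [if_neg hm, if_neg hm]
    simp

lemma scores_eq (uvl : List (String × List Int)) (var : String) (cc : List String) (d : Int)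
    (ks : List String) :
    ((ks.flatMap (fun u => cc.flatMap (fun const => gspec uvl var u const))).foldl (fun total spec =>
        let op := spec.1
        let var_first := spec.2.1
        let sb := spec.2.2
        let n : Int := sb.length
        let lo : Int := pvCountBelow sb d false
        let hi : Int := pvCountBelow sb d true
        if op == "!" then total + (n - (hi - lo))
        else if op == ">" then total + (if var_first then lo else n - hi)
        else if op == "<" then total + (if var_first then n - hi else lo)
        else if op == "=" then total + (hi - lo)
        else total) 0)
      = ((ks.map (fun u => (cc.map (fun const => pairCount uvl var u const d)).sum)).sum) := by
  rw [PySem.List.foldl_congr_mem _ _ (fun total spec => total + contribB d spec) _ ?_]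
  · rw [PySem.List.foldl_add, zero_add]
    rw [List.map_flatMap]
    rw [List.flatMap_def, List.sum_flatten, List.map_map]
    apply congrArg List.sum
    apply List.map_congr_left
    intro u _
    simp only [Function.comp]
    rw [List.map_flatMap, List.flatMap_def, List.sum_flatten, List.map_map]
    apply congrArg List.sum
    apply List.map_congr_left
    intro const _
    simp only [Function.comp]
    exact gspec_contrib_eq uvl var u const d
  · intro total spec _
    simp only [contribB]
    split_ifs <;> ring

-- ===== VERDICT (by name: the statement is the Claim_ definition above) =====
theorem least_constring_val_spec : Claim_equal_least_constring_val := by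
  intro vd uvl cc _ _
  simp only [Spec_least_constring_val, least_constring_val, least_constring_val_alt]
  rw [B_specs_eq vd.1 uvl cc (pvKeys uvl)]
  have hd : ∀ (init : PySem.Dict Int Int), vd.2.foldl (fun cd0 d =>
      (pvKeys uvl).foldl (fun cd1 unassigned_var =>
        cc.foldl (fun cd2 const =>
          if PySem.Str.isIn vd.1 const && PySem.Str.isIn unassigned_var const then
            (pvLookup uvl unassigned_var).foldl (fun cd3 b =>
              let const_list := (PySem.Str.split? const " ").getD []
              let var_and_value : Int × Int :=
                if vd.1 == const_list.getD 0 "" then (d, b) else (b, d)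
              match PySem.List.pyGet? const_list (1 : Int) with
              | none => cd3
              | some c1 =>
                if c1 == "!" then
                  (if var_and_value.1 != var_and_value.2 then cd3.insert d (cd3.getD d 0 + 1) else cd3)
                else if c1 == ">" then
                  (if var_and_value.1 > var_and_value.2 then cd3.insert d (cd3.getD d 0 + 1) else cd3)
                else if c1 == "<" then
                  (if var_and_value.1 < var_and_value.2 then cd3.insert d (cd3.getD d 0 + 1) else cd3)
                else if c1 == "=" then
                  (if var_and_value.1 == var_and_value.2 then cd3.insert d (cd3.getD d 0 + 1) else cd3)
                else cd3) cd2
          else cd2) cd1) (cd0.insert d 0)) init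
    = vd.2.foldl (fun cd d =>
      cd.insert d (((pvKeys uvl).flatMap (fun u => cc.flatMap (fun const => gspec uvl vd.1 u const))).foldl (fun total spec =>
        let op := spec.1
        let var_first := spec.2.1
        let sb := spec.2.2
        let n : Int := sb.length
        let lo : Int := pvCountBelow sb d false
        let hi : Int := pvCountBelow sb d true
        if op == "!" then total + (n - (hi - lo))
        else if op == ">" then total + (if var_first then lo else n - hi)
        else if op == "<" then total + (if var_first then n - hi else lo)
        else if op == "=" then total + (hi - lo)
        else total) 0)) init := by
    intro init
    apply PySem.List.foldl_congr_mem
    intro cd d _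
    rw [A_keyloop_eq vd.1 uvl cc (pvKeys uvl) d cd 0, scores_eq uvl vd.1 cc d (pvKeys uvl), zero_add]
  rw [hd]
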